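-- pv_equiv track=rewrite | github.com/miciav/linux-benchmark-lib | tests/e2e/test_dfaas_multipass_e2e.py | _extract_config_ids_from_summaries
-- ===== SOURCE A (Python) =====
-- from typing import Any, Iterator, TypeVar
--
-- def _extract_config_ids_from_summaries(
--     summaries: list[dict[str, Any]],
-- ) -> list[str]:
--     config_ids = {
--         str(entry["config_id"])
--         for entry in summaries
--         if isinstance(entry, dict) and entry.get("config_id")
--     }
--     return sorted(config_ids)
-- ===== SOURCE B (Python) =====
-- def _insert_sorted_unique(lst, x):
--     # insert x into the already-sorted, duplicate-free list lst, in place;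
--     # skip if already present
--     i = 0
--     while i < len(lst):
--         if x < lst[i]:
--             lst.insert(i, x)
--             return
--         if x == lst[i]:
--             return
--         i += 1
--     lst.append(x)
--
--
-- def _extract_config_ids_from_summaries(
--     summaries,
-- ):
--     # single pass: no set, no sort call — the output list is kept sorted and
--     # duplicate-free at every step by ordered insertion
--     sorted_unique = []
--     for entry in summaries:
--         if isinstance(entry, dict) and entry.get("config_id"):
--             _insert_sorted_unique(sorted_unique, str(entry["config_id"]))
--     return sorted_unique
-- ===== Notes on version B (the rewrite author's own statement) =====
-- stated objective: alternative
-- what changed: B removes both the set and the sort: a single pass over summaries maintains a sorted duplicate-free result list as an invariant, inserting each id at its ordered position (insertion-sort-with-dedup) instead of A's set-comprehension followed by sorted().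
import Mathlib
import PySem

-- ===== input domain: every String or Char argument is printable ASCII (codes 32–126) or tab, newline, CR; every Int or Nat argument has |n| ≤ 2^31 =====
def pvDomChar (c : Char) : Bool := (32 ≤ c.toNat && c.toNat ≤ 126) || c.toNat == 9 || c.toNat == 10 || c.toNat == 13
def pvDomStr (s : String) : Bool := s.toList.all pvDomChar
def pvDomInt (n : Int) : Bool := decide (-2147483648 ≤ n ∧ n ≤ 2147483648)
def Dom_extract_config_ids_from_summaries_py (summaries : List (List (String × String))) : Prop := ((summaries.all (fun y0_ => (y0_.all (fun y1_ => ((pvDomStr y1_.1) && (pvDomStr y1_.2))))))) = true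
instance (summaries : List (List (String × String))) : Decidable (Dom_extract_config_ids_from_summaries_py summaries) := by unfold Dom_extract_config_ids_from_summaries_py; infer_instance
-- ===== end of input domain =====

-- B replaces A's set-comprehension + sorted() with a single pass that keeps the result sorted and duplicate-free by ordered insertion; alternative decomposition, no set and no sort call.


-- ===== PORT A =====
-- set comprehension: iterate summaries, add str(entry["config_id"]) when entry.get("config_id") is truthy
-- (entries are dicts of str→str here, so isinstance(entry, dict) is always true and str(v) = v); then sorted(set)
def extract_config_ids_from_summaries_py (summaries : List (List (String × String))) : List String :=
  PySem.List.sorted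
    (summaries.foldl
      (fun s entry =>
        match PySem.Dict.get? (PySem.Dict.mk entry) "config_id" with
        | some v => if v ≠ "" then PySem.Set.add s v else s   -- truthy str = non-empty
        | none => s)
      PySem.Set.empty)
    (fun x => x) false

-- ===== PORT B =====
-- _insert_sorted_unique: the while loop over the sorted list as its structural recursion
def pvInsertSU (x : String) : List String → List String
  | [] => [x]                                   -- lst.append(x)
  | y :: t =>
      if x < y then x :: y :: t                 -- lst.insert(i, x); return
      else if x = y then y :: t                 -- return (already present)
      else y :: pvInsertSU x t                  -- i += 1

def extract_config_ids_from_summaries_py_alt (summaries : List (List (String × String))) : List String :=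
  summaries.foldl
    (fun acc entry =>
      match PySem.Dict.get? (PySem.Dict.mk entry) "config_id" with
      | some v => if v ≠ "" then pvInsertSU v acc else acc
      | none => acc)
    []

-- ===== PRECONDITION & SPEC =====
def Spec_extract_config_ids_from_summaries_py (summaries : List (List (String × String))) (out : List String) : Prop := out = extract_config_ids_from_summaries_py_alt summaries
instance (summaries : List (List (String × String))) (out : List String) : Decidable (Spec_extract_config_ids_from_summaries_py summaries out) := by unfold Spec_extract_config_ids_from_summaries_py; infer_instance

-- ===== CLAIM (what is proved, stated in full; the proofs are below) =====
def Claim_equal_extract_config_ids_from_summaries_py : Prop := ∀ (summaries : List (List (String × String))), Dom_extract_config_ids_from_summaries_py summaries → Spec_extract_config_ids_from_summaries_py summaries (extract_config_ids_from_summaries_py summaries)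

-- ===== LEMMAS AND PROOFS =====

-- the value extracted from one entry, if any (proof-side abbreviation shared by both fold lemmas)
def pvGetId (entry : List (String × String)) : Option String :=
  match PySem.Dict.get? (PySem.Dict.mk entry) "config_id" with
  | some v => if v ≠ "" then some v else none
  | none => none

-- A's conditional fold over summaries is a Set.add fold over the filtered id list
theorem pv_foldA (ss : List (List (String × String))) (s : List String) :
    ss.foldl
      (fun s entry =>
        match PySem.Dict.get? (PySem.Dict.mk entry) "config_id" with
        | some v => if v ≠ "" then PySem.Set.add s v else s
        | none => s)
      s = (ss.filterMap pvGetId).foldl PySem.Set.add s := by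
  induction ss generalizing s with
  | nil => rfl
  | cons e t ih =>
    rw [List.foldl_cons, List.filterMap_cons]
    rcases hg : PySem.Dict.get? (PySem.Dict.mk e) "config_id" with _ | w
    · have hpv : pvGetId e = none := by unfold pvGetId; rw [hg]
      simp only [hpv]
      exact ih s
    · have hpv : pvGetId e = if w ≠ "" then some w else none := by unfold pvGetId; rw [hg]
      by_cases hw : w = ""
      · rw [if_neg (by simp [hw])] at hpv
        simp only [hpv]
        rw [if_neg (by simp [hw])]
        exact ih s
      · rw [if_pos hw] at hpv
        simp only [hpv]
        rw [if_pos hw, List.foldl_cons]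
        exact ih (PySem.Set.add s w)

-- B's conditional fold over summaries is a pvInsertSU fold over the same filtered id list
theorem pv_foldB (ss : List (List (String × String))) (acc : List String) :
    ss.foldl
      (fun acc entry =>
        match PySem.Dict.get? (PySem.Dict.mk entry) "config_id" with
        | some v => if v ≠ "" then pvInsertSU v acc else acc
        | none => acc)
      acc = (ss.filterMap pvGetId).foldl (fun acc v => pvInsertSU v acc) acc := by
  induction ss generalizing acc with
  | nil => rfl
  | cons e t ih =>
    rw [List.foldl_cons, List.filterMap_cons]
    rcases hg : PySem.Dict.get? (PySem.Dict.mk e) "config_id" with _ | w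
    · have hpv : pvGetId e = none := by unfold pvGetId; rw [hg]
      simp only [hpv]
      exact ih acc
    · have hpv : pvGetId e = if w ≠ "" then some w else none := by unfold pvGetId; rw [hg]
      by_cases hw : w = ""
      · rw [if_neg (by simp [hw])] at hpv
        simp only [hpv]
        rw [if_neg (by simp [hw])]
        exact ih acc
      · rw [if_pos hw] at hpv
        simp only [hpv]
        rw [if_pos hw, List.foldl_cons]
        exact ih (pvInsertSU w acc)

-- ordered insertion preserves strict sortedness and adds exactly x to the members
theorem pv_insert_spec (x : String) (l : List String) (hl : l.Pairwise (· < ·)) :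
    (pvInsertSU x l).Pairwise (· < ·) ∧ (∀ y, y ∈ pvInsertSU x l ↔ y ∈ l ∨ y = x) := by
  induction l with
  | nil => simp [pvInsertSU]
  | cons z t ih =>
    rcases List.pairwise_cons.mp hl with ⟨hz, ht⟩
    by_cases hlt : x < z
    · have he : pvInsertSU x (z :: t) = x :: z :: t := by
        simp only [pvInsertSU]; rw [if_pos hlt]
      rw [he]
      refine ⟨List.pairwise_cons.mpr ⟨?_, hl⟩, ?_⟩
      · intro y hy
        rcases List.mem_cons.mp hy with rfl | hy
        · exact hlt
        · exact lt_trans hlt (hz y hy)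
      · intro y; simp [List.mem_cons]; tauto
    · by_cases heq : x = z
      · have he : pvInsertSU x (z :: t) = z :: t := by
          simp only [pvInsertSU]; rw [if_neg hlt, if_pos heq]
        rw [he]
        refine ⟨hl, fun y => ?_⟩
        simp only [List.mem_cons]
        constructor
        · intro h; exact Or.inl h
        · rintro (h | rfl)
          · exact h
          · exact Or.inl heq
      · obtain ⟨hp, hm⟩ := ih ht
        have he : pvInsertSU x (z :: t) = z :: pvInsertSU x t := by
          simp only [pvInsertSU]; rw [if_neg hlt, if_neg heq]
        rw [he]
        refine ⟨List.pairwise_cons.mpr ⟨?_, hp⟩, ?_⟩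
        · intro y hy
          rcases (hm y).mp hy with hy | rfl
          · exact hz y hy
          · exact lt_of_le_of_ne (not_lt.mp hlt) (Ne.symm heq)
        · intro y
          simp only [List.mem_cons, hm y]
          tauto

-- iterating ordered insertion over any id list: strictly sorted result, members = acc ∪ ids
theorem pv_foldInsert_spec (ids : List String) (acc : List String) (hacc : acc.Pairwise (· < ·)) :
    (ids.foldl (fun acc v => pvInsertSU v acc) acc).Pairwise (· < ·) ∧
      (∀ y, y ∈ ids.foldl (fun acc v => pvInsertSU v acc) acc ↔ y ∈ acc ∨ y ∈ ids) := by
  induction ids generalizing acc with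
  | nil => exact ⟨hacc, fun y => by simp⟩
  | cons v t ih =>
    obtain ⟨hp, hm⟩ := pv_insert_spec v acc hacc
    obtain ⟨hp2, hm2⟩ := ih (pvInsertSU v acc) hp
    rw [List.foldl_cons]
    refine ⟨hp2, fun y => ?_⟩
    rw [hm2 y, hm y, List.mem_cons]
    tauto

-- ===== VERDICT (by name: the statement is the Claim_ definition above) =====
theorem extract_config_ids_from_summaries_py_spec : Claim_equal_extract_config_ids_from_summaries_py := by
  intro summaries _
  unfold Spec_extract_config_ids_from_summaries_py
  simp only [extract_config_ids_from_summaries_py, extract_config_ids_from_summaries_py_alt]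
  rw [pv_foldA, pv_foldB]
  set ids := summaries.filterMap pvGetId with hids
  have hempty : (PySem.Set.empty : List String) = [] := rfl
  rw [hempty, ← PySem.Set.ofList_eq_foldl]
  obtain ⟨hpw, hmem⟩ := pv_foldInsert_spec ids [] (List.Pairwise.nil)
  have hnd : (ids.foldl (fun acc v => pvInsertSU v acc) []).Nodup :=
    hpw.imp (fun h => ne_of_lt h)
  have hperm : (ids.foldl (fun acc v => pvInsertSU v acc) []).Perm (PySem.Set.ofList ids) :=
    (List.perm_ext_iff_of_nodup hnd (PySem.Set.nodup_ofList ids)).mpr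
      (fun a => by rw [hmem a, PySem.Set.mem_ofList]; simp)
  exact (PySem.List.sorted_eq_of_perm_of_pairwise_lt (PySem.Set.ofList ids)
    (ids.foldl (fun acc v => pvInsertSU v acc) []) (fun x => x) hperm hpw)
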